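-- pv_equiv track=rewrite | github.com/astronomer/airflow | dev/registry/extract_metadata.py | count_modules_by_type
-- ===== SOURCE A (Python) =====
-- from typing import Any
--
-- def count_modules_by_type(provider_yaml: dict[str, Any]) -> dict[str, int]:
--     """Count modules by type from provider.yaml."""
--     counts = {
--         "operator": 0,
--         "hook": 0,
--         "sensor": 0,
--         "trigger": 0,
--         "transfer": 0,
--         "notifier": 0,
--         "secret": 0,
--         "logging": 0,
--         "executor": 0,
--         "bundle": 0,
--         "decorator": 0,
--     }
--
--     for op in provider_yaml.get("operators", []):
--         counts["operator"] += len(op.get("python-modules", []))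
--
--     for hook in provider_yaml.get("hooks", []):
--         counts["hook"] += len(hook.get("python-modules", []))
--
--     for sensor in provider_yaml.get("sensors", []):
--         counts["sensor"] += len(sensor.get("python-modules", []))
--
--     for trigger in provider_yaml.get("triggers", []):
--         counts["trigger"] += len(trigger.get("python-modules", []))
--
--     counts["transfer"] = len(provider_yaml.get("transfers", []))
--
--     # Count notifications (notifiers)
--     counts["notifier"] = len(provider_yaml.get("notifications", []))
--
--     # Count secrets backends
--     counts["secret"] = len(provider_yaml.get("secrets-backends", []))
--
--     # Count logging handlers
--     counts["logging"] = len(provider_yaml.get("logging", []))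
--
--     # Count executors
--     counts["executor"] = len(provider_yaml.get("executors", []))
--
--     # Count bundle backends
--     for bundle_group in provider_yaml.get("bundles", []):
--         counts["bundle"] += len(bundle_group.get("python-modules", []))
--
--     # Count task decorators
--     counts["decorator"] = len(provider_yaml.get("task-decorators", []))
--
--     return counts
-- ===== SOURCE B (Python) =====
-- # Inverted traversal: one pass over the dict's own items, dispatching each yaml key
-- # through a reverse key map, instead of eleven per-category lookups.
-- _KEYMAP = {
--     "operators": ("operator", True),
--     "hooks": ("hook", True),
--     "sensors": ("sensor", True),
--     "triggers": ("trigger", True),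
--     "transfers": ("transfer", False),
--     "notifications": ("notifier", False),
--     "secrets-backends": ("secret", False),
--     "logging": ("logging", False),
--     "executors": ("executor", False),
--     "bundles": ("bundle", True),
--     "task-decorators": ("decorator", False),
-- }
--
--
-- def count_modules_by_type(provider_yaml):
--     """Count modules by type from provider.yaml."""
--     counts = dict.fromkeys(
--         ("operator", "hook", "sensor", "trigger", "transfer", "notifier",
--          "secret", "logging", "executor", "bundle", "decorator"), 0)
--     for key, entries in provider_yaml.items():
--         spec = _KEYMAP.get(key)
--         if spec is None:
--             continue
--         out_key, per_module = spec
--         if per_module: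
--             counts[out_key] += sum(len(e.get("python-modules", [])) for e in entries)
--         else:
--             counts[out_key] = len(entries)
--     return counts
-- ===== Notes on version B (the rewrite author's own statement) =====
-- stated objective: alternative
-- what changed: Inverts the traversal: instead of eleven category-by-category lookups into the input dict, B makes a single pass over the dict's own items and dispatches each yaml key through a reverse key map into a pre-seeded counts dict.
import Mathlib
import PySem

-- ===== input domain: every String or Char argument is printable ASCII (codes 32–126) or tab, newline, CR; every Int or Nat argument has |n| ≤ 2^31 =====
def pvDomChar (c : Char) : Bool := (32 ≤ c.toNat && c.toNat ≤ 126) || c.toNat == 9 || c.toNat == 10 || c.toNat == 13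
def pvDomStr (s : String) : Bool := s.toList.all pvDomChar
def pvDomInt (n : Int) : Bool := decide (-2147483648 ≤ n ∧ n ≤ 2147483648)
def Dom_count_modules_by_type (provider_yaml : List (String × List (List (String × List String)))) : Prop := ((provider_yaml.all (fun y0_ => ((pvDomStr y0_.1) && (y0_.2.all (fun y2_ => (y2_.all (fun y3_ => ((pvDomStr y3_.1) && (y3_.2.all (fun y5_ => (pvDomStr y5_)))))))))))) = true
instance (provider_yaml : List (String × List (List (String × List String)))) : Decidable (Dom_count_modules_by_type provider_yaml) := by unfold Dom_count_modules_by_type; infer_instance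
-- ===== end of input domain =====

-- B inverts A's traversal: one pass over the dict's own items dispatching each yaml key through a
-- reverse key map, instead of eleven per-category lookups; same return value (no mutation involved).

-- ===== PORT A =====
-- provider_yaml.get(k, []) — first-match association-list lookup
def pvGetA (provider_yaml : List (String × List (List (String × List String)))) (k : String) :
    List (List (String × List String)) :=
  (PySem.Dict.mk provider_yaml).getD k []

-- op.get("python-modules", []) |> len
def pvModLen (op : List (String × List String)) : Int :=
  ((PySem.Dict.mk op).getD "python-modules" []).length

def count_modules_by_type (provider_yaml : List (String × List (List (String × List String)))) : List (String × Int) :=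
  let counts : PySem.Dict String Int :=
    (((((((((((PySem.Dict.empty.insert "operator" 0).insert "hook" 0).insert "sensor" 0).insert
      "trigger" 0).insert "transfer" 0).insert "notifier" 0).insert "secret" 0).insert
      "logging" 0).insert "executor" 0).insert "bundle" 0).insert "decorator" 0)
  let counts := (pvGetA provider_yaml "operators").foldl
    (fun c op => c.modify "operator" 0 (· + pvModLen op)) counts
  let counts := (pvGetA provider_yaml "hooks").foldl
    (fun c hook => c.modify "hook" 0 (· + pvModLen hook)) counts
  let counts := (pvGetA provider_yaml "sensors").foldl
    (fun c sensor => c.modify "sensor" 0 (· + pvModLen sensor)) counts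
  let counts := (pvGetA provider_yaml "triggers").foldl
    (fun c trigger => c.modify "trigger" 0 (· + pvModLen trigger)) counts
  let counts := counts.insert "transfer" (pvGetA provider_yaml "transfers").length
  let counts := counts.insert "notifier" (pvGetA provider_yaml "notifications").length
  let counts := counts.insert "secret" (pvGetA provider_yaml "secrets-backends").length
  let counts := counts.insert "logging" (pvGetA provider_yaml "logging").length
  let counts := counts.insert "executor" (pvGetA provider_yaml "executors").length
  let counts := (pvGetA provider_yaml "bundles").foldl
    (fun c bundle_group => c.modify "bundle" 0 (· + pvModLen bundle_group)) counts
  let counts := counts.insert "decorator" (pvGetA provider_yaml "task-decorators").length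
  counts.items

-- ===== PORT B =====
-- the reverse key map _KEYMAP: yaml key → (result key, count python-modules per entry?)
def pvKeyMapB : PySem.Dict String (String × Bool) :=
  PySem.Dict.mk [("operators", ("operator", true)), ("hooks", ("hook", true)),
    ("sensors", ("sensor", true)), ("triggers", ("trigger", true)),
    ("transfers", ("transfer", false)), ("notifications", ("notifier", false)),
    ("secrets-backends", ("secret", false)), ("logging", ("logging", false)),
    ("executors", ("executor", false)), ("bundles", ("bundle", true)),
    ("task-decorators", ("decorator", false))]

-- sum(len(e.get("python-modules", [])) for e in entries)
def pvSumB (entries : List (List (String × List String))) : Int :=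
  (entries.map (fun e => (((PySem.Dict.mk e).getD "python-modules" []).length : Int))).sum

-- provider_yaml.items(): under the assoc-list dict convention (lookup = first match) the dict's
-- items are the pairs with the FIRST occurrence of each key; ported by hand (scan with a seen-key
-- list), exact on that convention.
def pvGo {α : Type} (l : List (String × α)) (seen : List String) : List (String × α) :=
  match l with
  | [] => []
  | p :: t => if seen.contains p.1 then pvGo t seen else p :: pvGo t (p.1 :: seen)

def pvItems {α : Type} (l : List (String × α)) : List (String × α) := pvGo l []

-- the loop body of B: dispatch one (key, entries) item through the key map
def pvStepB (c : PySem.Dict String Int) (kv : String × List (List (String × List String))) :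
    PySem.Dict String Int :=
  match pvKeyMapB.get? kv.1 with
  | none => c
  | some s => if s.2 then c.modify s.1 0 (· + pvSumB kv.2) else c.insert s.1 (kv.2.length : Int)

def count_modules_by_type_alt (provider_yaml : List (String × List (List (String × List String)))) : List (String × Int) :=
  let counts : PySem.Dict String Int :=   -- dict.fromkeys((…11 keys…), 0)
    PySem.Dict.mk [("operator", 0), ("hook", 0), ("sensor", 0), ("trigger", 0), ("transfer", 0),
      ("notifier", 0), ("secret", 0), ("logging", 0), ("executor", 0), ("bundle", 0), ("decorator", 0)]
  ((pvItems provider_yaml).foldl pvStepB counts).items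

-- ===== PRECONDITION & SPEC =====
def Spec_count_modules_by_type (provider_yaml : List (String × List (List (String × List String)))) (out : List (String × Int)) : Prop := out = count_modules_by_type_alt provider_yaml
instance (provider_yaml : List (String × List (List (String × List String)))) (out : List (String × Int)) : Decidable (Spec_count_modules_by_type provider_yaml out) := by unfold Spec_count_modules_by_type; infer_instance

-- ===== CLAIM (what is proved, stated in full; the proofs are below) =====
def Claim_equal_count_modules_by_type : Prop := ∀ (provider_yaml : List (String × List (List (String × List String)))), Dom_count_modules_by_type provider_yaml → Spec_count_modules_by_type provider_yaml (count_modules_by_type provider_yaml)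

-- ===== LEMMAS AND PROOFS =====

-- ---- A-side loop characterisations ----
theorem pv_step_operator (x : List (String × List String))
    (a b c d e f g h i j k : Int) :
    (PySem.Dict.mk [("operator", a), ("hook", b), ("sensor", c), ("trigger", d), ("transfer", e), ("notifier", f), ("secret", g), ("logging", h), ("executor", i), ("bundle", j), ("decorator", k)]).modify "operator" 0 (· + pvModLen x)
    = PySem.Dict.mk [("operator", a + pvModLen x), ("hook", b), ("sensor", c), ("trigger", d), ("transfer", e), ("notifier", f), ("secret", g), ("logging", h), ("executor", i), ("bundle", j), ("decorator", k)] := by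
  simp [PySem.Dict.modify, PySem.Dict.insert, PySem.Dict.getD, PySem.Dict.get?]

theorem pv_loop_operator (l : List (List (String × List String)))
    (a b c d e f g h i j k : Int) :
    l.foldl (fun cc op => cc.modify "operator" 0 (· + pvModLen op))
      (PySem.Dict.mk [("operator", a), ("hook", b), ("sensor", c), ("trigger", d), ("transfer", e), ("notifier", f), ("secret", g), ("logging", h), ("executor", i), ("bundle", j), ("decorator", k)])
    = PySem.Dict.mk [("operator", a + (l.map pvModLen).sum), ("hook", b), ("sensor", c), ("trigger", d), ("transfer", e), ("notifier", f), ("secret", g), ("logging", h), ("executor", i), ("bundle", j), ("decorator", k)] := by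
  induction l generalizing a with
  | nil => simp
  | cons x t ih =>
    rw [List.foldl_cons, pv_step_operator, ih]
    simp; ring

theorem pv_step_hook (x : List (String × List String))
    (a b c d e f g h i j k : Int) :
    (PySem.Dict.mk [("operator", a), ("hook", b), ("sensor", c), ("trigger", d), ("transfer", e), ("notifier", f), ("secret", g), ("logging", h), ("executor", i), ("bundle", j), ("decorator", k)]).modify "hook" 0 (· + pvModLen x)
    = PySem.Dict.mk [("operator", a), ("hook", b + pvModLen x), ("sensor", c), ("trigger", d), ("transfer", e), ("notifier", f), ("secret", g), ("logging", h), ("executor", i), ("bundle", j), ("decorator", k)] := by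
  simp [PySem.Dict.modify, PySem.Dict.insert, PySem.Dict.getD, PySem.Dict.get?]

theorem pv_loop_hook (l : List (List (String × List String)))
    (a b c d e f g h i j k : Int) :
    l.foldl (fun cc op => cc.modify "hook" 0 (· + pvModLen op))
      (PySem.Dict.mk [("operator", a), ("hook", b), ("sensor", c), ("trigger", d), ("transfer", e), ("notifier", f), ("secret", g), ("logging", h), ("executor", i), ("bundle", j), ("decorator", k)])
    = PySem.Dict.mk [("operator", a), ("hook", b + (l.map pvModLen).sum), ("sensor", c), ("trigger", d), ("transfer", e), ("notifier", f), ("secret", g), ("logging", h), ("executor", i), ("bundle", j), ("decorator", k)] := by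
  induction l generalizing b with
  | nil => simp
  | cons x t ih =>
    rw [List.foldl_cons, pv_step_hook, ih]
    simp; ring

theorem pv_step_sensor (x : List (String × List String))
    (a b c d e f g h i j k : Int) :
    (PySem.Dict.mk [("operator", a), ("hook", b), ("sensor", c), ("trigger", d), ("transfer", e), ("notifier", f), ("secret", g), ("logging", h), ("executor", i), ("bundle", j), ("decorator", k)]).modify "sensor" 0 (· + pvModLen x)
    = PySem.Dict.mk [("operator", a), ("hook", b), ("sensor", c + pvModLen x), ("trigger", d), ("transfer", e), ("notifier", f), ("secret", g), ("logging", h), ("executor", i), ("bundle", j), ("decorator", k)] := by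
  simp [PySem.Dict.modify, PySem.Dict.insert, PySem.Dict.getD, PySem.Dict.get?]

theorem pv_loop_sensor (l : List (List (String × List String)))
    (a b c d e f g h i j k : Int) :
    l.foldl (fun cc op => cc.modify "sensor" 0 (· + pvModLen op))
      (PySem.Dict.mk [("operator", a), ("hook", b), ("sensor", c), ("trigger", d), ("transfer", e), ("notifier", f), ("secret", g), ("logging", h), ("executor", i), ("bundle", j), ("decorator", k)])
    = PySem.Dict.mk [("operator", a), ("hook", b), ("sensor", c + (l.map pvModLen).sum), ("trigger", d), ("transfer", e), ("notifier", f), ("secret", g), ("logging", h), ("executor", i), ("bundle", j), ("decorator", k)] := by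
  induction l generalizing c with
  | nil => simp
  | cons x t ih =>
    rw [List.foldl_cons, pv_step_sensor, ih]
    simp; ring

theorem pv_step_trigger (x : List (String × List String))
    (a b c d e f g h i j k : Int) :
    (PySem.Dict.mk [("operator", a), ("hook", b), ("sensor", c), ("trigger", d), ("transfer", e), ("notifier", f), ("secret", g), ("logging", h), ("executor", i), ("bundle", j), ("decorator", k)]).modify "trigger" 0 (· + pvModLen x)
    = PySem.Dict.mk [("operator", a), ("hook", b), ("sensor", c), ("trigger", d + pvModLen x), ("transfer", e), ("notifier", f), ("secret", g), ("logging", h), ("executor", i), ("bundle", j), ("decorator", k)] := by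
  simp [PySem.Dict.modify, PySem.Dict.insert, PySem.Dict.getD, PySem.Dict.get?]

theorem pv_loop_trigger (l : List (List (String × List String)))
    (a b c d e f g h i j k : Int) :
    l.foldl (fun cc op => cc.modify "trigger" 0 (· + pvModLen op))
      (PySem.Dict.mk [("operator", a), ("hook", b), ("sensor", c), ("trigger", d), ("transfer", e), ("notifier", f), ("secret", g), ("logging", h), ("executor", i), ("bundle", j), ("decorator", k)])
    = PySem.Dict.mk [("operator", a), ("hook", b), ("sensor", c), ("trigger", d + (l.map pvModLen).sum), ("transfer", e), ("notifier", f), ("secret", g), ("logging", h), ("executor", i), ("bundle", j), ("decorator", k)] := by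
  induction l generalizing d with
  | nil => simp
  | cons x t ih =>
    rw [List.foldl_cons, pv_step_trigger, ih]
    simp; ring

theorem pv_step_bundle (x : List (String × List String))
    (a b c d e f g h i j k : Int) :
    (PySem.Dict.mk [("operator", a), ("hook", b), ("sensor", c), ("trigger", d), ("transfer", e), ("notifier", f), ("secret", g), ("logging", h), ("executor", i), ("bundle", j), ("decorator", k)]).modify "bundle" 0 (· + pvModLen x)
    = PySem.Dict.mk [("operator", a), ("hook", b), ("sensor", c), ("trigger", d), ("transfer", e), ("notifier", f), ("secret", g), ("logging", h), ("executor", i), ("bundle", j + pvModLen x), ("decorator", k)] := by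
  simp [PySem.Dict.modify, PySem.Dict.insert, PySem.Dict.getD, PySem.Dict.get?]

theorem pv_loop_bundle (l : List (List (String × List String)))
    (a b c d e f g h i j k : Int) :
    l.foldl (fun cc op => cc.modify "bundle" 0 (· + pvModLen op))
      (PySem.Dict.mk [("operator", a), ("hook", b), ("sensor", c), ("trigger", d), ("transfer", e), ("notifier", f), ("secret", g), ("logging", h), ("executor", i), ("bundle", j), ("decorator", k)])
    = PySem.Dict.mk [("operator", a), ("hook", b), ("sensor", c), ("trigger", d), ("transfer", e), ("notifier", f), ("secret", g), ("logging", h), ("executor", i), ("bundle", j + (l.map pvModLen).sum), ("decorator", k)] := by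
  induction l generalizing j with
  | nil => simp
  | cons x t ih =>
    rw [List.foldl_cons, pv_step_bundle, ih]
    simp; ring

-- ---- B-side: accumulated value of each slot over an item list ----
def pvAddS (yk : String) (l : List (String × List (List (String × List String)))) : Int :=
  ((l.filter (fun kv => kv.1 == yk)).map (fun kv => pvSumB kv.2)).sum

def pvSetS (yk : String) (x : Int) (l : List (String × List (List (String × List String)))) : Int :=
  l.foldl (fun acc kv => if kv.1 == yk then (kv.2.length : Int) else acc) x

theorem pvAddS_cons (yk : String) (kv : String × List (List (String × List String)))
    (t : List (String × List (List (String × List String)))) :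
    pvAddS yk (kv :: t) = (if kv.1 == yk then pvSumB kv.2 else 0) + pvAddS yk t := by
  simp only [pvAddS, List.filter_cons]
  split_ifs <;> simp

theorem pvB_step (kv : String × List (List (String × List String)))
    (a b c d e f g h i j k : Int) :
    pvStepB (PySem.Dict.mk [("operator", a), ("hook", b), ("sensor", c), ("trigger", d), ("transfer", e), ("notifier", f), ("secret", g), ("logging", h), ("executor", i), ("bundle", j), ("decorator", k)]) kv
    = PySem.Dict.mk [("operator", if kv.1 == "operators" then a + pvSumB kv.2 else a),
        ("hook", if kv.1 == "hooks" then b + pvSumB kv.2 else b),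
        ("sensor", if kv.1 == "sensors" then c + pvSumB kv.2 else c),
        ("trigger", if kv.1 == "triggers" then d + pvSumB kv.2 else d),
        ("transfer", if kv.1 == "transfers" then (kv.2.length : Int) else e),
        ("notifier", if kv.1 == "notifications" then (kv.2.length : Int) else f),
        ("secret", if kv.1 == "secrets-backends" then (kv.2.length : Int) else g),
        ("logging", if kv.1 == "logging" then (kv.2.length : Int) else h),
        ("executor", if kv.1 == "executors" then (kv.2.length : Int) else i),
        ("bundle", if kv.1 == "bundles" then j + pvSumB kv.2 else j),
        ("decorator", if kv.1 == "task-decorators" then (kv.2.length : Int) else k)] := by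
  obtain ⟨key, v⟩ := kv
  unfold pvStepB pvKeyMapB
  by_cases h1 : key = "operators"
  · subst h1; simp [PySem.Dict.get?, PySem.Dict.modify, PySem.Dict.insert, PySem.Dict.getD]
  by_cases h2 : key = "hooks"
  · subst h2; simp [PySem.Dict.get?, PySem.Dict.modify, PySem.Dict.insert, PySem.Dict.getD]
  by_cases h3 : key = "sensors"
  · subst h3; simp [PySem.Dict.get?, PySem.Dict.modify, PySem.Dict.insert, PySem.Dict.getD]
  by_cases h4 : key = "triggers"
  · subst h4; simp [PySem.Dict.get?, PySem.Dict.modify, PySem.Dict.insert, PySem.Dict.getD]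
  by_cases h5 : key = "transfers"
  · subst h5; simp [PySem.Dict.get?, PySem.Dict.modify, PySem.Dict.insert, PySem.Dict.getD]
  by_cases h6 : key = "notifications"
  · subst h6; simp [PySem.Dict.get?, PySem.Dict.modify, PySem.Dict.insert, PySem.Dict.getD]
  by_cases h7 : key = "secrets-backends"
  · subst h7; simp [PySem.Dict.get?, PySem.Dict.modify, PySem.Dict.insert, PySem.Dict.getD]
  by_cases h8 : key = "logging"
  · subst h8; simp [PySem.Dict.get?, PySem.Dict.modify, PySem.Dict.insert, PySem.Dict.getD]
  by_cases h9 : key = "executors"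
  · subst h9; simp [PySem.Dict.get?, PySem.Dict.modify, PySem.Dict.insert, PySem.Dict.getD]
  by_cases h10 : key = "bundles"
  · subst h10; simp [PySem.Dict.get?, PySem.Dict.modify, PySem.Dict.insert, PySem.Dict.getD]
  by_cases h11 : key = "task-decorators"
  · subst h11; simp [PySem.Dict.get?, PySem.Dict.modify, PySem.Dict.insert, PySem.Dict.getD]
  · simp [PySem.Dict.get?, List.find?_cons, beq_iff_eq, Ne.symm h1, Ne.symm h2, Ne.symm h3,
      Ne.symm h4, Ne.symm h5, Ne.symm h6, Ne.symm h7, Ne.symm h8, Ne.symm h9, Ne.symm h10, Ne.symm h11,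
      h1, h2, h3, h4, h5, h6, h7, h8, h9, h10, h11]

theorem pvB_loop (l : List (String × List (List (String × List String))))
    (a b c d e f g h i j k : Int) :
    l.foldl pvStepB (PySem.Dict.mk [("operator", a), ("hook", b), ("sensor", c), ("trigger", d), ("transfer", e), ("notifier", f), ("secret", g), ("logging", h), ("executor", i), ("bundle", j), ("decorator", k)])
    = PySem.Dict.mk [("operator", a + pvAddS "operators" l), ("hook", b + pvAddS "hooks" l),
        ("sensor", c + pvAddS "sensors" l), ("trigger", d + pvAddS "triggers" l),
        ("transfer", pvSetS "transfers" e l), ("notifier", pvSetS "notifications" f l),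
        ("secret", pvSetS "secrets-backends" g l), ("logging", pvSetS "logging" h l),
        ("executor", pvSetS "executors" i l), ("bundle", j + pvAddS "bundles" l),
        ("decorator", pvSetS "task-decorators" k l)] := by
  induction l generalizing a b c d e f g h i j k with
  | nil => simp [pvAddS, pvSetS]
  | cons kv t ih =>
    rw [List.foldl_cons, pvB_step, ih]
    refine congrArg PySem.Dict.mk ?_
    simp only [List.cons.injEq, Prod.mk.injEq, true_and, and_true]
    refine ⟨?_, ?_, ?_, ?_, ?_, ?_, ?_, ?_, ?_, ?_, ?_⟩ <;>
      first
        | (rw [pvAddS_cons]; split_ifs <;> ring)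
        | (simp only [pvSetS, List.foldl_cons])

-- ---- pvItems (dict items) vs first-match lookup ----
theorem pvGo_filter_eq {α : Type} (l : List (String × α)) (seen : List String) (yk : String) :
    (pvGo l seen).filter (fun kv => kv.1 == yk)
    = (if seen.contains yk then []
       else match (PySem.Dict.mk l).get? yk with
            | some v => [(yk, v)]
            | none => []) := by
  induction l generalizing seen with
  | nil => simp [pvGo, PySem.Dict.get?]
  | cons p t ih =>
    rw [pvGo]
    by_cases hy : yk ∈ seen
    · by_cases hc : seen.contains p.1
      · rw [if_pos hc, ih]; simp [hy]
      · have hp : (p.1 == yk) = false := by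
          refine beq_eq_false_iff_ne.mpr ?_
          intro hpe; exact (by simpa using hc : p.1 ∉ seen) (hpe ▸ hy)
        rw [if_neg hc, List.filter_cons, if_neg (by simp [hp]), ih]
        simp [hy]
    · by_cases hc : seen.contains p.1
      · have hp : (p.1 == yk) = false := by
          refine beq_eq_false_iff_ne.mpr ?_
          intro hpe; exact hy (hpe ▸ (by simpa using hc : p.1 ∈ seen))
        rw [if_pos hc, ih, PySem.Dict.get?_mk_cons]
        simp [hy, hp]
      · rw [if_neg hc, List.filter_cons, ih, PySem.Dict.get?_mk_cons]
        by_cases hp : p.1 = yk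
        · subst hp
          simp [hy]
        · simp [hp, hy, Ne.symm hp]

theorem pvItems_filter_eq {α : Type} (l : List (String × α)) (yk : String) :
    (pvItems l).filter (fun kv => kv.1 == yk)
    = (match (PySem.Dict.mk l).get? yk with
       | some v => [(yk, v)]
       | none => []) := by
  rw [pvItems, pvGo_filter_eq]; rfl

theorem pvAddS_pvItems (l : List (String × List (List (String × List String)))) (yk : String) :
    pvAddS yk (pvItems l) = pvSumB ((PySem.Dict.mk l).getD yk []) := by
  unfold pvAddS
  rw [pvItems_filter_eq]
  cases hg : (PySem.Dict.mk l).get? yk with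
  | none => simp [PySem.Dict.getD_of_get?_eq_none _ _ hg, pvSumB]
  | some v => simp [PySem.Dict.getD_of_get?_eq_some _ _ hg]

theorem pvSetS_pvItems (l : List (String × List (List (String × List String)))) (yk : String) :
    pvSetS yk 0 (pvItems l) = (((PySem.Dict.mk l).getD yk []).length : Int) := by
  unfold pvSetS
  rw [← List.foldl_filter, pvItems_filter_eq]
  cases hg : (PySem.Dict.mk l).get? yk with
  | none => simp [PySem.Dict.getD_of_get?_eq_none _ _ hg]
  | some v => simp [PySem.Dict.getD_of_get?_eq_some _ _ hg]

-- ===== VERDICT (by name: the statement is the Claim_ definition above) =====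
theorem count_modules_by_type_spec : Claim_equal_count_modules_by_type := by
  intro provider_yaml _
  unfold Spec_count_modules_by_type count_modules_by_type count_modules_by_type_alt
  dsimp only
  have hinit :
      (((((((((((PySem.Dict.empty.insert "operator" (0:Int)).insert "hook" 0).insert "sensor" 0).insert
        "trigger" 0).insert "transfer" 0).insert "notifier" 0).insert "secret" 0).insert
        "logging" 0).insert "executor" 0).insert "bundle" 0).insert "decorator" 0)
      = PySem.Dict.mk [("operator", 0), ("hook", 0), ("sensor", 0), ("trigger", 0),
          ("transfer", 0), ("notifier", 0), ("secret", 0), ("logging", 0),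
          ("executor", 0), ("bundle", 0), ("decorator", 0)] := by
    simp [PySem.Dict.insert, PySem.Dict.empty]
  rw [hinit, pv_loop_operator, pv_loop_hook, pv_loop_sensor, pv_loop_trigger]
  simp [PySem.Dict.insert]
  rw [pv_loop_bundle, pvB_loop]
  simp only [pvAddS_pvItems, pvSetS_pvItems]
  simp [pvGetA, pvSumB]
  exact ⟨rfl, rfl, rfl, rfl, rfl⟩
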